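-- pv_equiv track=rewrite | github.com/brandonm06/ComputerProgrammingUltimatePythonRepository | 07StringsAsLists/Assignment/main.py | in_alphabetical_order
-- ===== SOURCE A (Python) =====
-- def in_alphabetical_order(word) :
--     if len(word) == 0:
--         return True
--
--     firstletter = word[0]
--     for letters in word :
--         if letters > firstletter:
--             firstletter = letters
--         elif firstletter > letters:
--             return False
--     return True
-- ===== SOURCE B (Python) =====
-- def in_alphabetical_order(word):
--     return list(word) == sorted(word)
-- ===== Notes on version B (the rewrite author's own statement) =====
-- stated objective: simpler
-- what changed: Replaced the single-pass running-maximum scan with early return by building a sorted copy and comparing it to the original (list(word) == sorted(word)).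
import Mathlib
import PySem

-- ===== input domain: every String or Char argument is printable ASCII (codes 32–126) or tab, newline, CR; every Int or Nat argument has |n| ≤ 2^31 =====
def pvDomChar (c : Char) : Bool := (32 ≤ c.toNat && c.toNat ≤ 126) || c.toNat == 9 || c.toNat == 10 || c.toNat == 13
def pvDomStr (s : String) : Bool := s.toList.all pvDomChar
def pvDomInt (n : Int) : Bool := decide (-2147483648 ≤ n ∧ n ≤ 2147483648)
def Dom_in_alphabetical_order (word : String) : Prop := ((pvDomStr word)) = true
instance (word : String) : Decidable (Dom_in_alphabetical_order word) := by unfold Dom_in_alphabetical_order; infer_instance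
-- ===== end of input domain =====

-- B checks sortedness by comparing the word with its sorted copy instead of A's running-maximum scan; objective: simpler.

-- ===== PORT A =====
-- the for-loop of A: state is 'firstletter'; early 'return False' becomes the false branch
def pvLoopA (firstletter : Char) : List Char → Bool
  | [] => true
  | c :: rest =>
      if firstletter < c then pvLoopA c rest
      else if c < firstletter then false
      else pvLoopA firstletter rest

def in_alphabetical_order (word : String) : Bool :=
  match word.toList with
  | [] => true
  | c0 :: _ => pvLoopA c0 word.toList

-- ===== PORT B =====
def in_alphabetical_order_alt (word : String) : Bool :=
  word.toList == PySem.List.sorted word.toList (fun x => x) false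

-- ===== PRECONDITION & SPEC =====
def Spec_in_alphabetical_order (word : String) (out : Bool) : Prop := out = in_alphabetical_order_alt word
instance (word : String) (out : Bool) : Decidable (Spec_in_alphabetical_order word out) := by unfold Spec_in_alphabetical_order; infer_instance

-- ===== CLAIM (what is proved, stated in full; the proofs are below) =====
def Claim_equal_in_alphabetical_order : Prop := ∀ (word : String), Dom_in_alphabetical_order word → Spec_in_alphabetical_order word (in_alphabetical_order word)

-- ===== LEMMAS AND PROOFS =====

-- A's loop accepts iff the state followed by the rest is a ≤-chain (the running max equals the last seen element whenever the loop has not failed)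
theorem pvLoopA_iff_chain (l : List Char) : ∀ fl : Char, pvLoopA fl l = true ↔ List.IsChain (· ≤ ·) (fl :: l) := by
  induction l with
  | nil => intro fl; simp [pvLoopA, List.isChain_singleton]
  | cons c rest ih =>
      intro fl
      simp only [pvLoopA, List.isChain_cons_cons]
      rcases lt_trichotomy fl c with h | h | h
      · simp [h, le_of_lt h, ih]
      · subst h; simp [ih]
      · simp [not_lt.mpr (le_of_lt h), h, not_le.mpr h]

theorem portA_iff_pairwise (word : String) :
    in_alphabetical_order word = true ↔ List.Pairwise (· ≤ ·) word.toList := by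
  unfold in_alphabetical_order
  cases h : word.toList with
  | nil => simp
  | cons c0 rest =>
      rw [pvLoopA_iff_chain, List.isChain_cons_cons, List.isChain_iff_pairwise]
      simp

theorem portB_iff_pairwise (word : String) :
    in_alphabetical_order_alt word = true ↔ List.Pairwise (· ≤ ·) word.toList := by
  unfold in_alphabetical_order_alt
  rw [beq_iff_eq]
  constructor
  · intro h
    have := PySem.List.sorted_pairwise (xs := word.toList) (key := fun x : Char => x)
    rw [← h] at this
    exact this
  · intro h
    exact (PySem.List.sorted_eq_self_of_pairwise _ _ h).symm

-- ===== VERDICT (by name: the statement is the Claim_ definition above) =====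
theorem in_alphabetical_order_spec : Claim_equal_in_alphabetical_order := by
  intro word _
  unfold Spec_in_alphabetical_order
  rw [Bool.eq_iff_iff, portA_iff_pairwise, portB_iff_pairwise]
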